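-- pv_equiv track=rewrite | github.com/Niranjan11111/Accenture-Coding-Solutions | Accenture Prep/prajith/multiples of 3 pairs.py | count_pairs_multiple_of_3
-- ===== SOURCE A (Python) =====
-- def count_pairs_multiple_of_3(A):
--     seen_pairs = set()
--     for i in range(len(A)):
--         for j in range(i + 1, len(A)):
--             if A[i] % 3 == 0 or A[j] % 3 == 0:
--                 pair = tuple(sorted([A[i], A[j]]))
--                 if pair not in seen_pairs:
--                     seen_pairs.add(pair)
--     return len(seen_pairs)
-- ===== SOURCE B (Python) =====
-- def count_pairs_multiple_of_3(A):
--     counts = {}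
--     for v in A:
--         counts[v] = counts.get(v, 0) + 1
--     d = len(counts)
--     m = 0
--     dup_m = 0
--     for v, c in counts.items():
--         if v % 3 == 0:
--             m += 1
--             if c >= 2:
--                 dup_m += 1
--     return m * (d - m) + m * (m - 1) // 2 + dup_m
-- ===== Notes on version B (the rewrite author's own statement) =====
-- stated objective: faster
-- what changed: Replaces the O(n^2) index-pair scan with a seen-pairs set by a single counting pass: a value->multiplicity dict, then a closed-form combinatorial count m*(d-m)+C(m,2) over distinct values plus one adjustment for multiples of 3 occurring at least twice.
import Mathlib
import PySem

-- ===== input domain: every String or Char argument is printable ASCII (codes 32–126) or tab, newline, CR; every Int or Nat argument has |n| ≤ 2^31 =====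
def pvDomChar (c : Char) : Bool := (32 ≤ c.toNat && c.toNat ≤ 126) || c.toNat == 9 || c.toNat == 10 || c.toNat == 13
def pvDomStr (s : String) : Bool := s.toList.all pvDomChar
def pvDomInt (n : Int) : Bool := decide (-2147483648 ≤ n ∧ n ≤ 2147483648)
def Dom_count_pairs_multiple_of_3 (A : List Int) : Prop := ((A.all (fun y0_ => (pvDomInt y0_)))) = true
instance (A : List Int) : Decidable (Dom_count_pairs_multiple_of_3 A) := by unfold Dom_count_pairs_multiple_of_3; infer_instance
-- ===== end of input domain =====

-- B replaces A's O(n^2) index-pair scan over a seen-pairs set by one counting pass over a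
-- value->multiplicity dict and a closed-form combinatorial count (faster: asymptotic change).


-- ===== PORT A =====
-- tuple(sorted([x, y])): stable two-element sort, smaller value first (exact)
def pvPairA (x y : Int) : Int × Int :=
  if y < x then (y, x) else (x, y)

def count_pairs_multiple_of_3 (A : List Int) : Int :=
  let n : Int := (A.length : Int)
  let seen : PySem.Set (Int × Int) :=
    (PySem.List.pyRange 0 n 1).foldl (fun s i =>
      (PySem.List.pyRange (i + 1) n 1).foldl (fun s j =>
        if PySem.Int.mod (PySem.List.pyGetD A i 0) 3 == 0
            || PySem.Int.mod (PySem.List.pyGetD A j 0) 3 == 0 then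
          let pair := pvPairA (PySem.List.pyGetD A i 0) (PySem.List.pyGetD A j 0)
          if PySem.Set.contains s pair then s else PySem.Set.add s pair
        else s) s) PySem.Set.empty
  (seen.length : Int)

-- ===== PORT B =====
def count_pairs_multiple_of_3_alt (A : List Int) : Int :=
  let counts : PySem.Dict Int Int :=
    A.foldl (fun d v => d.insert v (d.getD v 0 + 1)) PySem.Dict.empty
  let d : Int := counts.size
  let md : Int × Int :=
    counts.items.foldl (fun (p : Int × Int) kv =>
      if PySem.Int.mod kv.1 3 == 0 then
        (p.1 + 1, if 2 ≤ kv.2 then p.2 + 1 else p.2)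
      else p) (0, 0)
  md.1 * (d - md.1) + PySem.Int.floordiv (md.1 * (md.1 - 1)) 2 + md.2

-- ===== PRECONDITION & SPEC =====
def Spec_count_pairs_multiple_of_3 (A : List Int) (out : Int) : Prop := out = count_pairs_multiple_of_3_alt A
instance (A : List Int) (out : Int) : Decidable (Spec_count_pairs_multiple_of_3 A out) := by unfold Spec_count_pairs_multiple_of_3; infer_instance

-- ===== CLAIM (what is proved, stated in full; the proofs are below) =====
def Claim_equal_count_pairs_multiple_of_3 : Prop := ∀ (A : List Int), Dom_count_pairs_multiple_of_3 A → Spec_count_pairs_multiple_of_3 A (count_pairs_multiple_of_3 A)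

-- ===== LEMMAS AND PROOFS =====

def pvCond (x y : Int) : Prop := 3 ∣ x ∨ 3 ∣ y

def pvCondB (x y : Int) : Bool := decide (3 ∣ x) || decide (3 ∣ y)

theorem pvCondB_iff (x y : Int) : pvCondB x y = true ↔ pvCond x y := by
  simp [pvCondB, pvCond]

-- step-membership of the inner loop body
theorem pv_mem_step (s : PySem.Set (Int × Int)) (c : Bool) (q y : Int × Int) :
    (y ∈ if c then (if PySem.Set.contains s q then s else PySem.Set.add s q) else s) ↔
      y ∈ s ∨ (c = true ∧ y = q) := by
  cases c with
  | false => simp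
  | true =>
    simp only [if_true, true_and]
    by_cases hq : PySem.Set.contains s q = true
    · rw [if_pos hq]
      constructor
      · exact Or.inl
      · rintro (h | rfl)
        · exact h
        · exact (PySem.Set.contains_iff s y).mp hq
    · rw [if_neg hq, PySem.Set.mem_add]

-- the boolean divisibility test of the ports, as pvCond
theorem pv_cond_bool (x y : Int) :
    ((PySem.Int.mod x 3 == 0 || PySem.Int.mod y 3 == 0) = true) ↔ pvCond x y := by
  simp only [Bool.or_eq_true, beq_iff_eq, PySem.Int.mod_eq_zero_iff_dvd, pvCond]

def pvGood (A : List Int) (p : Int × Int) : Prop :=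
  (∃ u w, u ∈ A ∧ w ∈ A ∧ u ≠ w ∧ pvCond u w ∧ p = pvPairA u w) ∨
  (∃ v, 3 ∣ v ∧ 2 ≤ A.count v ∧ p = (v, v))

theorem pv_mem_foldl {β : Type} (F : List β → Int → List β) (Q : Int → β → Prop)
    (h : ∀ s i y, y ∈ F s i ↔ y ∈ s ∨ Q i y) :
    ∀ (l : List Int) (s : List β) (y : β), y ∈ l.foldl F s ↔ y ∈ s ∨ ∃ i ∈ l, Q i y := by
  intro l
  induction l with
  | nil => simp
  | cons a t ih =>
    intro s y
    simp only [List.foldl_cons, ih, h, List.mem_cons]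
    constructor
    · rintro ((hs | hq) | ⟨i, hi, hq⟩)
      · exact Or.inl hs
      · exact Or.inr ⟨a, Or.inl rfl, hq⟩
      · exact Or.inr ⟨i, Or.inr hi, hq⟩
    · rintro (hs | ⟨i, (rfl | hi), hq⟩)
      · exact Or.inl (Or.inl hs)
      · exact Or.inl (Or.inr hq)
      · exact Or.inr ⟨i, hi, hq⟩

theorem pv_count_two (A : List Int) (x : Int) :
    (∃ i j : Nat, i < j ∧ A[i]? = some x ∧ A[j]? = some x) ↔ 2 ≤ A.count x := by
  induction A with
  | nil => simp
  | cons a t ih =>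
    constructor
    · rintro ⟨i, j, hij, hi, hj⟩
      cases i with
      | zero =>
        simp only [List.getElem?_cons_zero, Option.some.injEq] at hi
        cases j with
        | zero => omega
        | succ j =>
          simp only [List.getElem?_cons_succ] at hj
          have hx : x ∈ t := List.mem_of_getElem? hj
          have h1 := List.one_le_count_iff.mpr hx
          rw [hi, List.count_cons_self]
          omega
      | succ i =>
        cases j with
        | zero => omega
        | succ j =>
          simp only [List.getElem?_cons_succ] at hi hj
          have := ih.mp ⟨i, j, by omega, hi, hj⟩
          rw [List.count_cons]
          omega
    · intro h2
      by_cases hax : a = x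
      · subst hax
        rw [List.count_cons_self] at h2
        have hx : a ∈ t := List.one_le_count_iff.mp (by omega)
        obtain ⟨j, hj⟩ := List.mem_iff_getElem?.mp hx
        exact ⟨0, j + 1, by omega, by simp, by simpa using hj⟩
      · rw [List.count_cons_of_ne hax] at h2
        obtain ⟨i, j, hij, hi, hj⟩ := ih.mpr h2
        exact ⟨i + 1, j + 1, by omega, by simpa using hi, by simpa using hj⟩

theorem pv_mem_two (A : List Int) (u w : Int) (hne : u ≠ w) (hu : u ∈ A) (hw : w ∈ A) :
    ∃ i j : Nat, i < j ∧ ((A[i]? = some u ∧ A[j]? = some w) ∨ (A[i]? = some w ∧ A[j]? = some u)) := by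
  obtain ⟨i, hi⟩ := List.mem_iff_getElem?.mp hu
  obtain ⟨j, hj⟩ := List.mem_iff_getElem?.mp hw
  rcases lt_trichotomy i j with h | h | h
  · exact ⟨i, j, h, Or.inl ⟨hi, hj⟩⟩
  · exfalso; apply hne; subst h; rw [hi] at hj; exact Option.some.inj hj
  · exact ⟨j, i, h, Or.inr ⟨hj, hi⟩⟩

theorem pvPairA_comm (x y : Int) : pvPairA x y = pvPairA y x := by
  unfold pvPairA; split_ifs <;> (first | rfl | (exfalso; omega) | (simp [Prod.ext_iff]; omega))

theorem pvPairA_self (x : Int) : pvPairA x x = (x, x) := by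
  unfold pvPairA; simp

-- the index form of membership, Int indices as the loops run them
theorem pv_idx_good (A : List Int) (p : Int × Int) :
    (∃ i ∈ PySem.List.pyRange 0 (A.length : Int) 1,
       ∃ j ∈ PySem.List.pyRange (i + 1) (A.length : Int) 1,
         ((PySem.Int.mod (PySem.List.pyGetD A i 0) 3 == 0
             || PySem.Int.mod (PySem.List.pyGetD A j 0) 3 == 0) = true ∧
          p = pvPairA (PySem.List.pyGetD A i 0) (PySem.List.pyGetD A j 0)))
      ↔ pvGood A p := by
  constructor
  · rintro ⟨i, hi, j, hj, hc, rfl⟩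
    rw [PySem.List.mem_pyRange_one] at hi hj
    have hx : PySem.List.pyGetD A i 0 = A[i.toNat]'(by omega) :=
      PySem.List.pyGetD_eq_getElem A 0 (by omega) (by omega)
    have hy : PySem.List.pyGetD A j 0 = A[j.toNat]'(by omega) :=
      PySem.List.pyGetD_eq_getElem A 0 (by omega) (by omega)
    rw [pv_cond_bool] at hc
    set x := PySem.List.pyGetD A i 0 with hxd
    set y := PySem.List.pyGetD A j 0 with hyd
    have hxm : x ∈ A := by rw [hx]; exact List.getElem_mem _
    have hym : y ∈ A := by rw [hy]; exact List.getElem_mem _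
    by_cases hxy : x = y
    · refine Or.inr ⟨x, ?_, ?_, by rw [← hxy, pvPairA_self]⟩
      · rcases hc with h | h
        · exact h
        · exact hxy ▸ h
      · refine (pv_count_two A x).mp ⟨i.toNat, j.toNat, by omega, ?_, ?_⟩
        · rw [List.getElem?_eq_getElem (by omega)]; exact congrArg some hx.symm
        · rw [List.getElem?_eq_getElem (by omega)]
          exact congrArg some (by rw [← hy, ← hxy])
    · exact Or.inl ⟨x, y, hxm, hym, hxy, hc, rfl⟩
  · intro hg
    have key : ∃ i j : Nat, i < j ∧ ∃ x y,
        A[i]? = some x ∧ A[j]? = some y ∧ pvCond x y ∧ p = pvPairA x y := by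
      rcases hg with ⟨u, w, hu, hw, hne, hc, rfl⟩ | ⟨v, hv3, hcnt, rfl⟩
      · obtain ⟨i, j, hij, hor⟩ := pv_mem_two A u w hne hu hw
        rcases hor with ⟨h1, h2⟩ | ⟨h1, h2⟩
        · exact ⟨i, j, hij, u, w, h1, h2, hc, rfl⟩
        · exact ⟨i, j, hij, w, u, h1, h2, Or.symm hc, pvPairA_comm u w⟩
      · obtain ⟨i, j, hij, h1, h2⟩ := (pv_count_two A v).mpr hcnt
        exact ⟨i, j, hij, v, v, h1, h2, Or.inl hv3, (pvPairA_self v).symm⟩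
    obtain ⟨i, j, hij, x, y, hxi, hyj, hc, rfl⟩ := key
    have hjlen : j < A.length := (List.getElem?_eq_some_iff.mp hyj).1
    have hxv : A[i]'(by omega) = x := by
      have := List.getElem?_eq_some_iff.mp hxi
      exact this.2
    have hyv : A[j]'(hjlen) = y := (List.getElem?_eq_some_iff.mp hyj).2
    refine ⟨(i : Int), ?_, (j : Int), ?_, ?_⟩
    · rw [PySem.List.mem_pyRange_one]; omega
    · rw [PySem.List.mem_pyRange_one]; omega
    · have hgx : PySem.List.pyGetD A (i : Int) 0 = x := by
        rw [PySem.List.pyGetD_eq_getElem A 0 (by omega) (by exact_mod_cast by omega)]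
        simpa using hxv
      have hgy : PySem.List.pyGetD A (j : Int) 0 = y := by
        rw [PySem.List.pyGetD_eq_getElem A 0 (by omega) (by exact_mod_cast by omega)]
        simpa using hyv
      rw [hgx, hgy, pv_cond_bool]
      exact ⟨hc, rfl⟩

-- A's seen set, membership in value terms
theorem pv_memA (A : List Int) (p : Int × Int) :
    (p ∈ (PySem.List.pyRange 0 (A.length : Int) 1).foldl (fun s i =>
      (PySem.List.pyRange (i + 1) (A.length : Int) 1).foldl (fun s j =>
        if PySem.Int.mod (PySem.List.pyGetD A i 0) 3 == 0
            || PySem.Int.mod (PySem.List.pyGetD A j 0) 3 == 0 then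
          let pair := pvPairA (PySem.List.pyGetD A i 0) (PySem.List.pyGetD A j 0)
          if PySem.Set.contains s pair then s else PySem.Set.add s pair
        else s) s) PySem.Set.empty) ↔ pvGood A p := by
  rw [pv_mem_foldl _ (fun i y => ∃ j ∈ PySem.List.pyRange (i + 1) (A.length : Int) 1,
        ((PySem.Int.mod (PySem.List.pyGetD A i 0) 3 == 0
            || PySem.Int.mod (PySem.List.pyGetD A j 0) 3 == 0) = true ∧
         y = pvPairA (PySem.List.pyGetD A i 0) (PySem.List.pyGetD A j 0)))
      (fun s i y => by
        rw [pv_mem_foldl _ (fun j z =>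
          ((PySem.Int.mod (PySem.List.pyGetD A i 0) 3 == 0
              || PySem.Int.mod (PySem.List.pyGetD A j 0) 3 == 0) = true ∧
           z = pvPairA (PySem.List.pyGetD A i 0) (PySem.List.pyGetD A j 0)))
          (fun s j z => pv_mem_step s _ _ z)])]
  rw [← pv_idx_good A p]
  simp [PySem.Set.empty]

def pvStrict : List Int → List (Int × Int)
  | [] => []
  | v :: r => ((r.filter (fun w => pvCondB v w)).map (fun w => pvPairA v w)) ++ pvStrict r

def pvDiag (A : List Int) : List (Int × Int) :=
  ((PySem.Set.ofList A).filter (fun v => decide (3 ∣ v) && decide (2 ≤ A.count v))).map (fun v => (v, v))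

theorem pv_nodup_foldl {β : Type} (F : List β → Int → List β)
    (h : ∀ s i, s.Nodup → (F s i).Nodup) :
    ∀ (l : List Int) (s : List β), s.Nodup → (l.foldl F s).Nodup := by
  intro l
  induction l with
  | nil => intro s hs; simpa using hs
  | cons a t ih => intro s hs; exact ih _ (h s a hs)

theorem pv_nodupA (A : List Int) :
    ((PySem.List.pyRange 0 (A.length : Int) 1).foldl (fun s i =>
      (PySem.List.pyRange (i + 1) (A.length : Int) 1).foldl (fun s j =>
        if PySem.Int.mod (PySem.List.pyGetD A i 0) 3 == 0
            || PySem.Int.mod (PySem.List.pyGetD A j 0) 3 == 0 then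
          let pair := pvPairA (PySem.List.pyGetD A i 0) (PySem.List.pyGetD A j 0)
          if PySem.Set.contains s pair then s else PySem.Set.add s pair
        else s) s) PySem.Set.empty : List (Int × Int)).Nodup := by
  apply pv_nodup_foldl _ _ _ PySem.Set.empty (by simp [PySem.Set.empty])
  intro s i hs
  apply pv_nodup_foldl _ _ _ s hs
  intro s' j hs'
  simp only []
  split_ifs with h1 h2
  · exact hs'
  · exact PySem.Set.nodup_add _ _ hs'
  · exact hs'

theorem pv_mem_diag (A : List Int) (p : Int × Int) :
    p ∈ pvDiag A ↔ ∃ v, 3 ∣ v ∧ 2 ≤ A.count v ∧ p = (v, v) := by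
  unfold pvDiag
  simp only [List.mem_map, List.mem_filter, Bool.and_eq_true, decide_eq_true_eq]
  constructor
  · rintro ⟨v, ⟨_, h3, h2⟩, rfl⟩
    exact ⟨v, h3, h2, rfl⟩
  · rintro ⟨v, h3, h2, rfl⟩
    have hv : v ∈ A := List.one_le_count_iff.mp (by omega)
    exact ⟨v, ⟨(PySem.Set.mem_ofList A v).mpr hv, h3, h2⟩, rfl⟩

theorem pv_nodup_diag (A : List Int) : (pvDiag A).Nodup := by
  unfold pvDiag
  refine List.Nodup.map ?_ (List.Nodup.filter _ (PySem.Set.nodup_ofList A))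
  intro a b h
  simpa [Prod.ext_iff] using h


theorem pvPairA_inj (v w1 w2 : Int) (h : pvPairA v w1 = pvPairA v w2) : w1 = w2 := by
  unfold pvPairA at h; split_ifs at h <;> simp_all [Prod.ext_iff]

theorem pvPairA_fst_mem (x y : Int) : (pvPairA x y).1 = x ∨ (pvPairA x y).1 = y := by
  unfold pvPairA; split_ifs <;> simp

theorem pvPairA_snd_mem (x y : Int) : (pvPairA x y).2 = x ∨ (pvPairA x y).2 = y := by
  unfold pvPairA; split_ifs <;> simp

theorem pvPairA_ne_diag (u w : Int) (h : u ≠ w) (v : Int) : pvPairA u w ≠ (v, v) := by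
  unfold pvPairA; split_ifs <;> simp [Prod.ext_iff] <;> omega

theorem pv_mem_strict (D : List Int) (hD : D.Nodup) (p : Int × Int) :
    p ∈ pvStrict D ↔ ∃ u w, u ∈ D ∧ w ∈ D ∧ u ≠ w ∧ pvCond u w ∧ p = pvPairA u w := by
  induction D with
  | nil => simp [pvStrict]
  | cons v r ih =>
    rw [List.nodup_cons] at hD
    obtain ⟨hv, hr⟩ := hD
    simp only [pvStrict, List.mem_append, List.mem_map, List.mem_filter, ih hr]
    constructor
    · rintro (⟨w, ⟨hwmem, hcond⟩, rfl⟩ | ⟨u, w, hu, hw, hne, hc, rfl⟩)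
      · exact ⟨v, w, by simp, by simp [hwmem], fun h => hv (h ▸ hwmem), (pvCondB_iff v w).mp hcond, rfl⟩
      · exact ⟨u, w, by simp [hu], by simp [hw], hne, hc, rfl⟩
    · rintro ⟨u, w, hu, hw, hne, hc, rfl⟩
      rcases List.mem_cons.mp hu with rfl | hu'
      · have hw' : w ∈ r := by
          rcases List.mem_cons.mp hw with h | h
          · exact absurd h.symm hne
          · exact h
        exact Or.inl ⟨w, ⟨hw', (pvCondB_iff u w).mpr hc⟩, rfl⟩
      · rcases List.mem_cons.mp hw with rfl | hw'
        · refine Or.inl ⟨u, ⟨hu', (pvCondB_iff w u).mpr (Or.symm hc)⟩, (pvPairA_comm w u)⟩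
        · exact Or.inr ⟨u, w, hu', hw', hne, hc, rfl⟩

theorem pv_strict_comp (D : List Int) (p : Int × Int) (hp : p ∈ pvStrict D) :
    p.1 ∈ D ∧ p.2 ∈ D := by
  induction D with
  | nil => simp [pvStrict] at hp
  | cons v r ih =>
    simp only [pvStrict, List.mem_append, List.mem_map, List.mem_filter] at hp
    rcases hp with ⟨w, ⟨hw, _⟩, rfl⟩ | hp
    · constructor
      · rcases pvPairA_fst_mem v w with h | h <;> rw [h] <;> simp [hw]
      · rcases pvPairA_snd_mem v w with h | h <;> rw [h] <;> simp [hw]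
    · obtain ⟨h1, h2⟩ := ih hp
      exact ⟨List.mem_cons_of_mem _ h1, List.mem_cons_of_mem _ h2⟩

theorem pv_nodup_strict (D : List Int) (hD : D.Nodup) : (pvStrict D).Nodup := by
  induction D with
  | nil => simp [pvStrict]
  | cons v r ih =>
    rw [List.nodup_cons] at hD
    obtain ⟨hv, hr⟩ := hD
    refine List.Nodup.append ?_ (ih hr) ?_
    · refine List.Nodup.map ?_ (List.Nodup.filter _ hr)
      intro w1 w2 h
      exact pvPairA_inj v w1 w2 h
    · intro p hp hp2
      simp only [List.mem_map, List.mem_filter] at hp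
      obtain ⟨w, ⟨hw, _⟩, rfl⟩ := hp
      have hcomp := pv_strict_comp r _ hp2
      rcases pvPairA_fst_mem v w with h | h
      · exact hv (h ▸ hcomp.1)
      · rcases pvPairA_snd_mem v w with h2 | h2
        · exact hv (h2 ▸ hcomp.2)
        · -- p.1 = w and p.2 = w would force v = w below; directly: both components in r,
          -- but one component of pvPairA v w equals v unless v = w
          have : v = w := by
            unfold pvPairA at h h2
            split_ifs at h h2 <;> simp at h h2 <;> omega
          exact hv (this ▸ hw)

theorem pv_len_strict (D : List Int) :
    2 * ((pvStrict D).length : Int) =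
      2 * ((D.countP (fun v => decide (3 ∣ v)) : Int)) * ((D.length : Int) - (D.countP (fun v => decide (3 ∣ v)) : Int))
        + ((D.countP (fun v => decide (3 ∣ v)) : Int)) * ((D.countP (fun v => decide (3 ∣ v)) : Int) - 1) := by
  induction D with
  | nil => simp [pvStrict]
  | cons v r ih =>
    by_cases hv : 3 ∣ v
    · have hcnt : r.countP (fun w => pvCondB v w) = r.length := by
        apply List.countP_eq_length.mpr
        intro w _
        simp [pvCondB, hv]
      simp only [pvStrict, List.length_append, List.length_map, ← List.countP_eq_length_filter,
        hcnt, List.countP_cons, List.length_cons, hv, decide_true]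
      push_cast
      linear_combination ih
    · have hcnt : r.countP (fun w => pvCondB v w) = r.countP (fun w => decide (3 ∣ w)) := by
        apply List.countP_congr
        intro w _
        simp [pvCondB, hv]
      simp only [pvStrict, List.length_append, List.length_map, ← List.countP_eq_length_filter,
        hcnt, List.countP_cons, List.length_cons, hv, decide_false]
      push_cast
      linear_combination ih


theorem pv_mem_T (A : List Int) (p : Int × Int) :
    p ∈ pvStrict (PySem.Set.ofList A) ++ pvDiag A ↔ pvGood A p := by
  rw [List.mem_append, pv_mem_strict _ (PySem.Set.nodup_ofList A), pv_mem_diag]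
  unfold pvGood
  constructor
  · rintro (⟨u, w, hu, hw, h⟩ | h)
    · exact Or.inl ⟨u, w, (PySem.Set.mem_ofList A u).mp hu, (PySem.Set.mem_ofList A w).mp hw, h⟩
    · exact Or.inr h
  · rintro (⟨u, w, hu, hw, h⟩ | h)
    · exact Or.inl ⟨u, w, (PySem.Set.mem_ofList A u).mpr hu, (PySem.Set.mem_ofList A w).mpr hw, h⟩
    · exact Or.inr h

theorem pv_nodup_T (A : List Int) : (pvStrict (PySem.Set.ofList A) ++ pvDiag A).Nodup := by
  refine List.Nodup.append (pv_nodup_strict _ (PySem.Set.nodup_ofList A)) (pv_nodup_diag A) ?_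
  intro p hp hp2
  obtain ⟨u, w, _, _, hne, _, rfl⟩ := (pv_mem_strict _ (PySem.Set.nodup_ofList A) p).mp hp
  obtain ⟨v, _, _, hpv⟩ := (pv_mem_diag A _).mp hp2
  exact pvPairA_ne_diag u w hne v hpv

theorem pv_fold_md (A : List Int) (l : List Int) :
    ∀ (a b : Int),
      l.foldl (fun (p : Int × Int) k =>
        if PySem.Int.mod k 3 == 0 then
          (p.1 + 1, if (2 : Int) ≤ ((A.count k : Nat) : Int) then p.2 + 1 else p.2)
        else p) (a, b)
      = (a + (l.countP (fun v => decide (3 ∣ v)) : Int),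
         b + (l.countP (fun v => decide (3 ∣ v) && decide (2 ≤ A.count v)) : Int)) := by
  induction l with
  | nil => intro a b; simp
  | cons v t ih =>
    intro a b
    simp only [List.foldl_cons, List.countP_cons]
    by_cases h3 : 3 ∣ v
    · have hm : (PySem.Int.mod v 3 == 0) = true := by
        rw [beq_iff_eq, PySem.Int.mod_eq_zero_iff_dvd]
        exact h3
      rw [if_pos hm]
      by_cases h2 : 2 ≤ A.count v
      · rw [if_pos (by exact_mod_cast h2), ih]
        simp [h3, h2, Prod.ext_iff]
        all_goals omega
      · rw [if_neg (by exact_mod_cast h2), ih]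
        simp [h3, h2, Prod.ext_iff]
        all_goals omega
    · have hm : ¬((PySem.Int.mod v 3 == 0) = true) := by
        rw [beq_iff_eq, PySem.Int.mod_eq_zero_iff_dvd]
        exact h3
      rw [if_neg hm, ih]
      simp [h3]

theorem pv_final (A : List Int) : count_pairs_multiple_of_3 A = count_pairs_multiple_of_3_alt A := by
  unfold count_pairs_multiple_of_3 count_pairs_multiple_of_3_alt
  simp only []
  -- left side: the seen set has the same length as the canonical list T
  have hlen : ((PySem.List.pyRange 0 (A.length : Int) 1).foldl (fun s i =>
      (PySem.List.pyRange (i + 1) (A.length : Int) 1).foldl (fun s j =>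
        if PySem.Int.mod (PySem.List.pyGetD A i 0) 3 == 0
            || PySem.Int.mod (PySem.List.pyGetD A j 0) 3 == 0 then
          let pair := pvPairA (PySem.List.pyGetD A i 0) (PySem.List.pyGetD A j 0)
          if PySem.Set.contains s pair then s else PySem.Set.add s pair
        else s) s) PySem.Set.empty : List (Int × Int)).length
      = (pvStrict (PySem.Set.ofList A) ++ pvDiag A).length := by
    apply List.Perm.length_eq
    rw [List.perm_ext_iff_of_nodup (pv_nodupA A) (pv_nodup_T A)]
    intro p
    rw [pv_memA A p, pv_mem_T A p]
  rw [hlen]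
  -- right side: the dict is Counter(A); its items fold to the two counts
  rw [PySem.Dict.foldl_insert_getD_add_one_eq_counter, PySem.Dict.items_counter,
    List.foldl_map, pv_fold_md A _ 0 0]
  simp only [zero_add]
  have hsize : (PySem.Dict.counter A).size = (PySem.Set.ofList A).length := by
    have : (PySem.Dict.counter A).keys = PySem.Set.ofList A := PySem.Dict.keys_counter A
    unfold PySem.Dict.size PySem.Dict.keys at *
    simpa using congrArg List.length this
  rw [hsize]
  -- arithmetic: with 2*S = 2*m*(d-m) + m*(m-1) (pv_len_strict), the floor division collapses
  have hS := pv_len_strict (PySem.Set.ofList A)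
  set D := PySem.Set.ofList A with hD
  set m : Int := ((D.countP (fun v => decide (3 ∣ v)) : Nat) : Int) with hm
  set S : Int := ((pvStrict D).length : Int) with hSdef
  set dd : Int := ((D.length : Nat) : Int) with hdd
  have hfd : PySem.Int.floordiv (m * (m - 1)) 2 = S - m * (dd - m) := by
    have heq : m * (m - 1) = 2 * (S - m * (dd - m)) := by linear_combination -1 * hS
    rw [PySem.Int.floordiv_eq_ediv_of_pos (by norm_num), heq,
      Int.mul_ediv_cancel_left _ (by norm_num)]
  simp only [List.length_append]
  push_cast [← hSdef, ← hm, ← hdd]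
  rw [hfd]
  have hdiag : ((pvDiag A).length : Int)
      = ((D.countP (fun v => decide (3 ∣ v) && decide (2 ≤ A.count v)) : Nat) : Int) := by
    unfold pvDiag
    rw [List.length_map, ← List.countP_eq_length_filter]
  rw [← hSdef] at *
  push_cast [hdiag]
  ring

-- ===== VERDICT (by name: the statement is the Claim_ definition above) =====
theorem count_pairs_multiple_of_3_spec : Claim_equal_count_pairs_multiple_of_3 := by
  intro A _
  exact pv_final A
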